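-- pv_equiv track=rewrite | github.com/fang-evelyn/AI_PA3 | pa3.py | _has_win
-- ===== SOURCE A (Python) =====
-- def _has_win(player, cells):
--     count = 0
--     for cell in cells:
--         if cell == player:
--             count += 1
--             if count == 4:
--                 return True
--         else:
--             count = 0
--     return False
-- ===== SOURCE B (Python) =====
-- def _has_win(player, cells):
--     # sliding 4-window via zipped shifted views, instead of a resettable counter
--     return any(a == b == c == d == player
--                for a, b, c, d in zip(cells, cells[1:], cells[2:], cells[3:]))
-- ===== Notes on version B (the rewrite author's own statement) =====
-- stated objective: idiomatic
-- what changed: Replaces the manual resettable run counter with a single generator expression that checks every 4-cell sliding window (zip of the list with its three shifted tails) for all-equal-to-player.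
import Mathlib
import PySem

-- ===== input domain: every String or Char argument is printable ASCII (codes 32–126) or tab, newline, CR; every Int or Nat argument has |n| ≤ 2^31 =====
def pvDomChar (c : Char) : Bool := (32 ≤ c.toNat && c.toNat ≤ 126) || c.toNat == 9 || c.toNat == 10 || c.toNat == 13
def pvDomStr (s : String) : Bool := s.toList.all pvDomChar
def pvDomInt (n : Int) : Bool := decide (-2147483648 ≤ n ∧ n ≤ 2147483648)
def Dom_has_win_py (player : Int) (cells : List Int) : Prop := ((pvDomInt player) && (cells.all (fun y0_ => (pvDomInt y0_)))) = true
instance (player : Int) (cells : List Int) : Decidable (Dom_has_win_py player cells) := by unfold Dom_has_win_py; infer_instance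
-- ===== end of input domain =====

-- B replaces A's resettable run counter with a 4-window sliding check (zip of shifted tails); same cost, more idiomatic.


-- ===== PORT A =====
-- counter loop with early return: count of trailing cells equal to player, reset on mismatch
def hwGo (player : Int) : List Int → Nat → Bool
  | [], _ => false
  | c :: cs, count =>
    if c = player then
      (if count + 1 = 4 then true else hwGo player cs (count + 1))
    else hwGo player cs 0

def has_win_py (player : Int) (cells : List Int) : Bool := hwGo player cells 0

-- ===== PORT B =====
-- any(a == b == c == d == player for a,b,c,d in zip(cells, cells[1:], cells[2:], cells[3:]))
def has_win_py_alt (player : Int) (cells : List Int) : Bool :=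
  (((cells.zip (cells.drop 1)).zip ((cells.drop 2).zip (cells.drop 3))).any
    (fun x => x.1.1 == x.1.2 && x.1.2 == x.2.1 && x.2.1 == x.2.2 && x.2.2 == player))

-- ===== PRECONDITION & SPEC =====
def Spec_has_win_py (player : Int) (cells : List Int) (out : Bool) : Prop := out = has_win_py_alt player cells
instance (player : Int) (cells : List Int) (out : Bool) : Decidable (Spec_has_win_py player cells out) := by unfold Spec_has_win_py; infer_instance

-- ===== CLAIM (what is proved, stated in full; the proofs are below) =====
def Claim_equal_has_win_py : Prop := ∀ (player : Int) (cells : List Int), Dom_has_win_py player cells → Spec_has_win_py player cells (has_win_py player cells)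

-- ===== LEMMAS AND PROOFS =====

-- recursion-shaped view of the 4-window scan, used only in the proofs
def altGo (p : Int) : List Int → Bool
  | a :: b :: c :: d :: rest =>
    if a = p ∧ b = p ∧ c = p ∧ d = p then true else altGo p (b :: c :: d :: rest)
  | _ => false

lemma alt_eq_altGo (p : Int) (l : List Int) : has_win_py_alt p l = altGo p l := by
  fun_induction altGo p l with
  | case1 a b c d rest h =>
      obtain ⟨h1, h2, h3, h4⟩ := h
      subst h1 h2 h3 h4
      simp [has_win_py_alt]
  | case2 a b c d rest h ih =>
      rw [← ih]
      have hw : (a == b && b == c && c == d && d == p) = false := by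
        by_contra hb
        simp only [Bool.not_eq_false, Bool.and_eq_true, beq_iff_eq] at hb
        exact h ⟨by omega, by omega, by omega, hb.2⟩
      simp [has_win_py_alt, hw]
  | case3 l h =>
      rcases l with _ | ⟨x, _ | ⟨y, _ | ⟨z, _ | ⟨w, r⟩⟩⟩⟩ <;>
        first
          | exact absurd rfl (h x y z w r)
          | simp [has_win_py_alt]

lemma go_eq (p : Int) : ∀ (cells : List Int) (count : Nat), count ≤ 3 →
    hwGo p cells count = altGo p (List.replicate count p ++ cells) := by
  intro cells
  induction cells with
  | nil =>
      intro count hc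
      interval_cases count <;> simp [hwGo, altGo]
  | cons c cs ih =>
      intro count hc
      by_cases h : c = p
      · subst h
        by_cases h4 : count + 1 = 4
        · have : count = 3 := by omega
          subst this
          simp [hwGo, altGo, List.replicate]
        · have hle : count + 1 ≤ 3 := by omega
          have key : List.replicate count c ++ c :: cs = List.replicate (count + 1) c ++ cs := by
            rw [List.replicate_succ', List.append_assoc]; rfl
          rw [show hwGo c (c :: cs) count = hwGo c cs (count + 1) by simp [hwGo, h4],
              key, ← ih (count + 1) hle]
      · have lhs : hwGo p (c :: cs) count = hwGo p cs 0 := by simp [hwGo, h]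
        rw [lhs, ih 0 (by omega)]
        interval_cases count <;>
          rcases cs with _ | ⟨x, _ | ⟨y, _ | ⟨z, r⟩⟩⟩ <;>
          simp [altGo, h]

-- ===== VERDICT (by name: the statement is the Claim_ definition above) =====
theorem has_win_py_spec : Claim_equal_has_win_py := by
  intro player cells _
  unfold Spec_has_win_py has_win_py
  rw [alt_eq_altGo]
  simpa using go_eq player cells 0 (by omega)
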